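-- pv_equiv track=rewrite | github.com/Julinho-CD/case-datarisk | src/evaluate.py | map_ohe_feature_to_base
-- ===== SOURCE A (Python) =====
-- from typing import Dict, List, Optional
--
-- def map_ohe_feature_to_base(feature_name: str, base_candidates: List[str]) -> Optional[str]:
--     cleaned = str(feature_name).replace("num__", "").replace("cat__", "")
--     if cleaned in base_candidates:
--         return cleaned
--     for base in sorted(base_candidates, key=len, reverse=True):
--         if cleaned.startswith(f"{base}_") or cleaned == base:
--             return base
--     return None
-- ===== SOURCE B (Python) =====
-- def map_ohe_feature_to_base(feature_name, base_candidates):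
--     cleaned = str(feature_name).replace("num__", "").replace("cat__", "")
--     cands = set(base_candidates)
--     if cleaned in cands:
--         return cleaned
--     for i in range(len(cleaned) - 1, -1, -1):
--         if cleaned[i] == '_' and cleaned[:i] in cands:
--             return cleaned[:i]
--     return None
-- ===== Notes on version B (the rewrite author's own statement) =====
-- stated objective: faster
-- what changed: Instead of sorting all candidates by length and scanning them for a prefix match, B hashes the candidates into a set once and tests the underscore-boundary prefixes of the cleaned name from longest to shortest.
import Mathlib
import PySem

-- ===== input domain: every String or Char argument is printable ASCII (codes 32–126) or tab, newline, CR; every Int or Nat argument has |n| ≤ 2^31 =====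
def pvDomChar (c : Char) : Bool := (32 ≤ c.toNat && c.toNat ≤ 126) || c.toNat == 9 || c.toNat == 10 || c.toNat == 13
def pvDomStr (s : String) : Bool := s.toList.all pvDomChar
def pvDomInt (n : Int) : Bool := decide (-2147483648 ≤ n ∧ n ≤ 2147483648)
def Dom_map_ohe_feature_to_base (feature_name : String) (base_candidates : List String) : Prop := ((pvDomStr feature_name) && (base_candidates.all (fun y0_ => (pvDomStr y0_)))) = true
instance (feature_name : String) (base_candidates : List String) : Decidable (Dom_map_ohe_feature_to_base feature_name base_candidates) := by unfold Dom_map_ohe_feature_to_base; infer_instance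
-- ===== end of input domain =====

-- B replaces A's sort-all-candidates-by-length scan with a hash set of candidates and a
-- longest-to-shortest test of the underscore-boundary prefixes of the cleaned name (faster).

-- ===== PORT A =====
def map_ohe_feature_to_base (feature_name : String) (base_candidates : List String) : Option String :=
  let cleaned := PySem.Str.replace (PySem.Str.replace feature_name "num__" "") "cat__" ""
  if cleaned ∈ base_candidates then some cleaned
  else
    (PySem.List.sorted base_candidates (fun s => PySem.Str.len s) true).find?
      (fun base => PySem.Str.startswith cleaned (base ++ "_") || cleaned == base)

-- ===== PORT B =====
def map_ohe_feature_to_base_alt (feature_name : String) (base_candidates : List String) : Option String :=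
  let cleaned := PySem.Str.replace (PySem.Str.replace feature_name "num__" "") "cat__" ""
  let cands := PySem.Set.ofList base_candidates
  if cleaned ∈ cands then some cleaned
  else
    ((PySem.List.pyRange (PySem.Str.len cleaned - 1) (-1) (-1)).find?
        (fun i => PySem.Str.pyGet? cleaned i == some '_'
                  && decide (PySem.Str.slice cleaned none (some i) ∈ cands))).map
      (fun i => PySem.Str.slice cleaned none (some i))

-- ===== PRECONDITION & SPEC =====
def Spec_map_ohe_feature_to_base (feature_name : String) (base_candidates : List String) (out : Option String) : Prop := out = map_ohe_feature_to_base_alt feature_name base_candidates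
instance (feature_name : String) (base_candidates : List String) (out : Option String) : Decidable (Spec_map_ohe_feature_to_base feature_name base_candidates out) := by unfold Spec_map_ohe_feature_to_base; infer_instance

-- ===== CLAIM (what is proved, stated in full; the proofs are below) =====
def Claim_equal_map_ohe_feature_to_base : Prop := ∀ (feature_name : String) (base_candidates : List String), Dom_map_ohe_feature_to_base feature_name base_candidates → Spec_map_ohe_feature_to_base feature_name base_candidates (map_ohe_feature_to_base feature_name base_candidates)

-- ===== LEMMAS AND PROOFS =====

-- B's loop condition, at integer index i into the cleaned string
def pvCondB (cl : String) (cands : List String) (i : Int) : Bool :=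
  PySem.Str.pyGet? cl i == some '_' && decide (PySem.Str.slice cl none (some i) ∈ cands)

-- A's loop condition
def pvCondA (cl : String) (base : String) : Bool :=
  PySem.Str.startswith cl (base ++ "_") || cl == base

-- cleaned[:k] as a string, for a natural k
def pvTake (cl : String) (k : Nat) : String := String.ofList (cl.toList.take k)

-- B's scan, as a function of the number of indices still to visit
def pvBexp (cl : String) (cands : List String) (n : Nat) : Option String :=
  ((PySem.List.pyRange ((n : Int) - 1) (-1) (-1)).find? (pvCondB cl cands)).map
    (fun i => PySem.Str.slice cl none (some i))

lemma pvSlice_eq_take (cl : String) (k : Nat) :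
    PySem.Str.slice cl none (some (k : Int)) = pvTake cl k := by
  apply String.toList_inj.mp
  simp [pvTake, PySem.Str.toList_slice, PySem.List.slice_to_natCast]

lemma pvCondB_iff (cl : String) (cands : List String) (k : Nat) :
    pvCondB cl cands (k : Int) = true ↔
      (cl.toList[k]? = some '_' ∧ pvTake cl k ∈ cands) := by
  rw [pvCondB, Bool.and_eq_true, beq_iff_eq, decide_eq_true_iff, pvSlice_eq_take]
  simp [PySem.Str.pyGet?_eq]

lemma pvStartswith_iff (cl base : String) :
    PySem.Str.startswith cl (base ++ "_") = true ↔ base.toList ++ ['_'] <+: cl.toList := by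
  rw [PySem.Str.startswith_eq, PySem.Chars.startswith_iff]; simp

-- a base passes A's startswith test iff it is the underscore-boundary prefix of its length
lemma pvPrefix_elim (cl base : String) (h : base.toList ++ ['_'] <+: cl.toList) :
    cl.toList[base.toList.length]? = some '_' ∧ base = pvTake cl base.toList.length := by
  obtain ⟨t, ht⟩ := h
  have h2 : cl.toList.take base.toList.length = base.toList := by
    rw [← ht, List.append_assoc, List.take_left' rfl]
  constructor
  · rw [← ht, List.append_assoc, List.getElem?_append_right (le_refl _)]
    simp
  · rw [pvTake, h2, String.ofList_toList]

lemma pvPrefix_intro (cl : String) (k : Nat) (h : cl.toList[k]? = some '_') :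
    (pvTake cl k).toList ++ ['_'] <+: cl.toList := by
  have hk : k < cl.toList.length := by
    by_contra hk; rw [List.getElem?_eq_none (by omega)] at h; simp at h
  refine ⟨cl.toList.drop (k+1), ?_⟩
  rw [pvTake, String.toList_ofList]
  rw [List.getElem?_eq_getElem hk] at h
  simp only [Option.some.injEq] at h
  calc cl.toList.take k ++ ['_'] ++ cl.toList.drop (k+1)
      = cl.toList.take k ++ ('_' :: cl.toList.drop (k+1)) := by simp
    _ = cl.toList.take k ++ (cl.toList[k] :: cl.toList.drop (k+1)) := by rw [h]
    _ = cl.toList.take k ++ cl.toList.drop k := by rw [← List.drop_eq_getElem_cons hk]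
    _ = cl.toList := List.take_append_drop _ _

lemma pvCondA_iff (cl base : String) (cands : List String) (hb : base ∈ cands)
    (hni : cl ∉ cands) :
    pvCondA cl base = true ↔ base.toList ++ ['_'] <+: cl.toList := by
  rw [pvCondA, Bool.or_eq_true, pvStartswith_iff]
  constructor
  · rintro (h | h)
    · exact h
    · exact absurd (beq_iff_eq.mp h ▸ hb) hni
  · exact Or.inl

lemma pvIndex_lt (cl : String) (m : Nat) (h : cl.toList[m]? = some '_') :
    m < cl.toList.length := by
  by_contra hk; rw [List.getElem?_eq_none (by omega)] at h; cases h

lemma pvLen_take (cl : String) (m : Nat) (h : m < cl.toList.length) :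
    (pvTake cl m).toList.length = m := by
  rw [pvTake, String.toList_ofList, List.length_take]; omega

-- find? on a list pairwise-descending in key returns the element of maximal key when that
-- element is the unique satisfier of its key
lemma pvFind?_desc {α κ : Type} [LinearOrder κ] (key : α → κ) (p : α → Bool) :
    ∀ (l : List α), l.Pairwise (fun a b => key b ≤ key a) → ∀ x, x ∈ l → p x = true →
    (∀ y ∈ l, p y = true → key y ≤ key x) → (∀ y ∈ l, p y = true → key y = key x → y = x) →
    l.find? p = some x := by
  intro l
  induction l with
  | nil => intro _ x hx; simp at hx
  | cons a l ih =>
    intro hpw x hx hpx hmax huniq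
    rw [List.find?_cons]
    by_cases hpa : p a = true
    · simp only [hpa, Option.some.injEq]
      rcases List.mem_cons.mp hx with rfl | hxl
      · rfl
      · have h1 : key x ≤ key a := (List.pairwise_cons.mp hpw).1 x hxl
        have h2 : key a ≤ key x := hmax a (List.mem_cons_self) hpa
        exact huniq a List.mem_cons_self hpa (le_antisymm h2 h1)
    · simp only [hpa]
      have hx' : x ∈ l := by
        rcases List.mem_cons.mp hx with rfl | h
        · exact absurd hpx hpa
        · exact h
      exact ih (List.pairwise_cons.mp hpw).2 x hx' hpx
        (fun y hy => hmax y (List.mem_cons_of_mem _ hy))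
        (fun y hy => huniq y (List.mem_cons_of_mem _ hy))

lemma pvBexp_zero (cl : String) (cands : List String) : pvBexp cl cands 0 = none := by
  rw [pvBexp, PySem.List.pyRange_neg_one_eq_nil (by norm_num)]
  rfl

lemma pvBexp_succ (cl : String) (cands : List String) (n : Nat) :
    pvBexp cl cands (n + 1) =
      if pvCondB cl cands (n : Int) = true then some (PySem.Str.slice cl none (some (n : Int)))
      else pvBexp cl cands n := by
  rw [pvBexp, pvBexp]
  rw [show (((n : Nat) + 1 : Nat) : Int) - 1 = (n : Int) by push_cast; ring]
  rw [PySem.List.pyRange_neg_one_cons (by omega), List.find?_cons]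
  by_cases hc : pvCondB cl cands (n : Int) = true
  · simp [hc]
  · simp only [Bool.not_eq_true] at hc
    simp [hc]

lemma pvBexp_none_iff (cl : String) (cands : List String) (n : Nat) :
    pvBexp cl cands n = none ↔ ∀ k < n, pvCondB cl cands (k : Int) = false := by
  induction n with
  | zero => simp [pvBexp_zero]
  | succ n ih =>
    rw [pvBexp_succ]
    by_cases hc : pvCondB cl cands (n : Int) = true
    · simp only [hc, if_true]
      constructor
      · intro h; cases h
      · intro h; exact absurd hc (by simp [h n (by omega)])
    · simp only [Bool.not_eq_true] at hc
      rw [if_neg (by simp [hc]), ih]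
      constructor
      · intro h k hk
        rcases Nat.lt_succ_iff_lt_or_eq.mp hk with h' | rfl
        · exact h k h'
        · exact hc
      · intro h k hk; exact h k (by omega)

lemma pvBexp_some (cl : String) (cands : List String) (n : Nat) (s : String)
    (h : pvBexp cl cands n = some s) :
    ∃ m < n, pvCondB cl cands (m : Int) = true ∧ s = pvTake cl m ∧
      ∀ k, m < k → k < n → pvCondB cl cands (k : Int) = false := by
  induction n with
  | zero => rw [pvBexp_zero] at h; cases h
  | succ n ih =>
    rw [pvBexp_succ] at h
    by_cases hc : pvCondB cl cands (n : Int) = true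
    · rw [if_pos hc] at h
      refine ⟨n, by omega, hc, ?_, fun k hk1 hk2 => by omega⟩
      rw [← pvSlice_eq_take]; exact (Option.some.injEq _ _ ▸ h).symm
    · rw [if_neg hc] at h
      obtain ⟨m, hm, h1, h2, h3⟩ := ih h
      simp only [Bool.not_eq_true] at hc
      refine ⟨m, by omega, h1, h2, fun k hk1 hk2 => ?_⟩
      rcases Nat.lt_succ_iff_lt_or_eq.mp hk2 with h' | rfl
      · exact h3 k hk1 h'
      · exact hc

-- main loop equivalence, in the else branch
lemma pvLoop_eq (cl : String) (cands : List String) (hni : cl ∉ cands) :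
    (PySem.List.sorted cands (fun s => PySem.Str.len s) true).find? (pvCondA cl)
      = pvBexp cl cands cl.toList.length := by
  cases hbe : pvBexp cl cands cl.toList.length with
  | none =>
    rw [List.find?_eq_none]
    intro base hbmem hpA
    have hb : base ∈ cands := (PySem.List.mem_sorted _ _ _ _).mp hbmem
    have hpre := (pvCondA_iff cl base cands hb hni).mp hpA
    obtain ⟨hund, heq⟩ := pvPrefix_elim cl base hpre
    have hmn := pvIndex_lt cl _ hund
    have hQ : pvCondB cl cands (base.toList.length : Int) = true :=
      (pvCondB_iff cl cands _).mpr ⟨hund, heq ▸ hb⟩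
    have := (pvBexp_none_iff cl cands _).mp hbe _ hmn
    rw [hQ] at this; cases this
  | some s =>
    obtain ⟨m, hmn, hQ, hs, hmax⟩ := pvBexp_some cl cands _ s hbe
    obtain ⟨hund, hmem'⟩ := (pvCondB_iff cl cands m).mp hQ
    subst hs
    apply pvFind?_desc (fun s => PySem.Str.len s) (pvCondA cl) _
      (PySem.List.sorted_pairwise_rev cands _) _
      ((PySem.List.mem_sorted _ _ _ _).mpr hmem')
    · rw [pvCondA_iff cl _ cands hmem' hni]
      exact pvPrefix_intro cl m hund
    · intro y hy hpy
      have hyc : y ∈ cands := (PySem.List.mem_sorted _ _ _ _).mp hy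
      have hpre := (pvCondA_iff cl y cands hyc hni).mp hpy
      obtain ⟨hund', heq'⟩ := pvPrefix_elim cl y hpre
      have hkn := pvIndex_lt cl _ hund'
      have hQk : pvCondB cl cands (y.toList.length : Int) = true :=
        (pvCondB_iff cl cands _).mpr ⟨hund', heq' ▸ hyc⟩
      have hkm : y.toList.length ≤ m := by
        by_contra h; rw [Nat.not_le] at h
        have := hmax _ h hkn; rw [hQk] at this; cases this
      simp only [PySem.Str.len_eq, pvLen_take cl m hmn]
      exact_mod_cast hkm
    · intro y hy hpy hkey
      have hyc : y ∈ cands := (PySem.List.mem_sorted _ _ _ _).mp hy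
      have hpre := (pvCondA_iff cl y cands hyc hni).mp hpy
      obtain ⟨hund', heq'⟩ := pvPrefix_elim cl y hpre
      simp only [PySem.Str.len_eq, pvLen_take cl m hmn, Nat.cast_inj] at hkey
      rw [heq', hkey]

-- ===== VERDICT (by name: the statement is the Claim_ definition above) =====
theorem map_ohe_feature_to_base_spec : Claim_equal_map_ohe_feature_to_base := by
  intro feature_name base_candidates _
  unfold Spec_map_ohe_feature_to_base map_ohe_feature_to_base map_ohe_feature_to_base_alt
  simp only [PySem.Set.mem_ofList, PySem.Str.len_eq]
  set cl := PySem.Str.replace (PySem.Str.replace feature_name "num__" "") "cat__" "" with hcl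
  by_cases hmem : cl ∈ base_candidates
  · simp [hmem]
  · simp only [hmem, if_false]
    exact pvLoop_eq cl base_candidates hmem
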